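-- pv_equiv track=rewrite | github.com/m1sterzer0/codejams | 2014/Qual/D.py | doFairWar
-- ===== SOURCE A (Python) =====
-- def doFairWar(n,naomi,ken) :
--     score = 0
--     idxk = 0
--     for i in range(n) :
--         while (idxk < n and ken[idxk] < naomi[i]) : idxk += 1
--         if idxk >= n : score += 1
--         idxk += 1
--     return score
-- ===== SOURCE B (Python) =====
-- def doFairWar(n, naomi, ken):
--     # Scan Ken's cards once; a single pointer i tracks Naomi's next unblocked card.
--     i = 0
--     for j in range(n):
--         if i < n and ken[j] >= naomi[i]:
--             i += 1
--     return n - i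
-- ===== Notes on version B (the rewrite author's own statement) =====
-- stated objective: simpler
-- what changed: A loops over Naomi's cards with a nested while advancing a Ken pointer and counts unblocked cards; B makes a single flat pass over Ken's cards with one pointer into Naomi counting blocked cards and returns n minus that count.
-- outside the precondition, e.g. on doFairWar(-1, [], []): A returns 0, B returns -1; on doFairWar(4, [3], [-2, -1, -1, 0, 1, -3]): A returns 4, B returns 4
import Mathlib
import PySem

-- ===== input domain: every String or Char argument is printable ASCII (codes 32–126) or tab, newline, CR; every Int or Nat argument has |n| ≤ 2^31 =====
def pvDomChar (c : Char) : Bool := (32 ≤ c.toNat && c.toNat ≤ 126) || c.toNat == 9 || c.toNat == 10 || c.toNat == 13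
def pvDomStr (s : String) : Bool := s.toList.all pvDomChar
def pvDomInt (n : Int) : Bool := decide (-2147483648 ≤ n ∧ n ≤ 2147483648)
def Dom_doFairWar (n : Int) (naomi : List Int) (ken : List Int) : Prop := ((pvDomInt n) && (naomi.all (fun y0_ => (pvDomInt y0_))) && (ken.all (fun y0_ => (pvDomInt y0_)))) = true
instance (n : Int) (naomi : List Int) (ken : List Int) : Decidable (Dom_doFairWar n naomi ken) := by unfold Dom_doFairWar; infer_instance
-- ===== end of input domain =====

-- B replaces A's nested for/while over Naomi's cards by one flat pass over Ken's
-- cards counting blocked Naomi cards (objective: simpler).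

-- ===== PORT A =====
-- the inner `while (idxk < n and ken[idxk] < naomi[i]) : idxk += 1`
def doFairWarWhile (n : Int) (ken : List Int) (v : Int) (idxk : Int) : Int :=
  if h : idxk < n ∧ (PySem.List.pyGet? ken idxk).getD 0 < v then
    doFairWarWhile n ken v (idxk + 1)
  else idxk
termination_by (n - idxk).toNat
decreasing_by omega

def doFairWar (n : Int) (naomi : List Int) (ken : List Int) : Int :=
  -- state (score, idxk); `for i in range(n)`
  ((PySem.List.pyRange 0 n 1).foldl
    (fun st i =>
      let idxk := doFairWarWhile n ken ((PySem.List.pyGet? naomi i).getD 0) st.2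
      let score := if idxk ≥ n then st.1 + 1 else st.1
      (score, idxk + 1))
    (0, 0)).1

-- ===== PORT B =====
def doFairWar_alt (n : Int) (naomi : List Int) (ken : List Int) : Int :=
  -- pointer i into naomi; `for j in range(n)`
  let i := (PySem.List.pyRange 0 n 1).foldl
    (fun i j =>
      if i < n ∧ (PySem.List.pyGet? naomi i).getD 0 ≤ (PySem.List.pyGet? ken j).getD 0
      then i + 1 else i)
    0
  n - i

-- ===== PRECONDITION & SPEC =====
-- Pre_ excludes negative n (outside the natural domain; A returns 0, B returns n there)
-- and inputs whose lists are shorter than n, on which A raises IndexError in all but a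
-- few early-exhaustion corner cases (where B agrees with A anyway).
def Pre_doFairWar (n : Int) (naomi : List Int) (ken : List Int) : Prop :=
  0 ≤ n ∧ n ≤ (naomi.length : Int) ∧ n ≤ (ken.length : Int)
instance (n : Int) (naomi : List Int) (ken : List Int) : Decidable (Pre_doFairWar n naomi ken) := by
  unfold Pre_doFairWar; infer_instance
def pvWitness_doFairWar : Int × List Int × List Int := (3, [1, 5, 2], [2, 2, 7])

def Spec_doFairWar (n : Int) (naomi : List Int) (ken : List Int) (out : Int) : Prop := out = doFairWar_alt n naomi ken
instance (n : Int) (naomi : List Int) (ken : List Int) (out : Int) : Decidable (Spec_doFairWar n naomi ken out) := by unfold Spec_doFairWar; infer_instance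

-- ===== CLAIM (what is proved, stated in full; the proofs are below) =====
def Claim_equal_doFairWar : Prop := ∀ (n : Int) (naomi : List Int) (ken : List Int), Dom_doFairWar n naomi ken → Pre_doFairWar n naomi ken → Spec_doFairWar n naomi ken (doFairWar n naomi ken)

-- ===== LEMMAS AND PROOFS =====

-- the common two-pointer state machine both programs implement
def warS (n : Int) (naomi ken : List Int) (i j : Int) : Int :=
  if _hi : i < n then
    if _hj : j < n then
      if (PySem.List.pyGet? ken j).getD 0 < (PySem.List.pyGet? naomi i).getD 0 then
        warS n naomi ken i (j + 1)
      else
        warS n naomi ken (i + 1) (j + 1)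
    else n - i
  else 0
termination_by ((n - i).toNat + (n - j).toNat)
decreasing_by all_goals omega

lemma warS_nonpos (n : Int) (naomi ken : List Int) (i j : Int) (h : n ≤ i) :
    warS n naomi ken i j = 0 := by
  unfold warS; rw [dif_neg (by omega)]

-- characterisation of A's inner while loop: it does not change warS, and it stops
-- either past n or at a ken card that blocks naomi's card i
lemma while_spec (n : Int) (naomi ken : List Int) (i j : Int) (hi : i < n) :
    warS n naomi ken i (doFairWarWhile n ken ((PySem.List.pyGet? naomi i).getD 0) j)
      = warS n naomi ken i j ∧
    (n ≤ doFairWarWhile n ken ((PySem.List.pyGet? naomi i).getD 0) j ∨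
      (doFairWarWhile n ken ((PySem.List.pyGet? naomi i).getD 0) j < n ∧
       ¬ (PySem.List.pyGet? ken (doFairWarWhile n ken ((PySem.List.pyGet? naomi i).getD 0) j)).getD 0
           < (PySem.List.pyGet? naomi i).getD 0)) ∧
    j ≤ doFairWarWhile n ken ((PySem.List.pyGet? naomi i).getD 0) j := by
  generalize hm : (n - j).toNat = m
  induction m generalizing j with
  | zero =>
    rw [doFairWarWhile, dif_neg (by omega)]
    refine ⟨rfl, ?_, le_refl _⟩
    left; omega
  | succ m ih =>
    rw [doFairWarWhile]
    by_cases h : j < n ∧ (PySem.List.pyGet? ken j).getD 0 < (PySem.List.pyGet? naomi i).getD 0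
    · rw [dif_pos h]
      obtain ⟨h1, h2, h3⟩ := ih (j + 1) (by omega)
      refine ⟨?_, h2, by omega⟩
      rw [h1]
      -- warS i (j+1) = warS i j  in the skip branch
      conv_rhs => rw [warS]
      rw [dif_pos hi, dif_pos h.1, if_pos h.2]
    · rw [dif_neg h]
      refine ⟨rfl, ?_, le_refl _⟩
      by_cases hj : j < n
      · right; exact ⟨hj, fun hc => h ⟨hj, hc⟩⟩
      · left; omega

-- A's outer loop, from naomi index i with ken pointer j and score s, adds warS i j
lemma portA_loop (n : Int) (naomi ken : List Int) (i : Int) :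
    ∀ j s, ((PySem.List.pyRange i n 1).foldl
      (fun st i =>
        let idxk := doFairWarWhile n ken ((PySem.List.pyGet? naomi i).getD 0) st.2
        let score := if idxk ≥ n then st.1 + 1 else st.1
        (score, idxk + 1))
      (s, j)).1 = s + warS n naomi ken i j := by
  generalize hm : (n - i).toNat = m
  induction m generalizing i with
  | zero =>
    intro j s
    rw [PySem.List.pyRange_one_eq_nil (by omega), List.foldl_nil, warS_nonpos _ _ _ _ _ (by omega)]
    ring
  | succ m ih =>
    intro j s
    have hi : i < n := by omega
    rw [PySem.List.pyRange_one_cons hi, List.foldl_cons]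
    obtain ⟨h1, h2, h3⟩ := while_spec n naomi ken i j hi
    set j' := doFairWarWhile n ken ((PySem.List.pyGet? naomi i).getD 0) j with hj'
    simp only
    rcases h2 with h2 | h2
    · rw [if_pos (by omega), ih (i + 1) (by omega)]
      have : warS n naomi ken i j = n - i := by
        rw [← h1, warS, dif_pos hi, dif_neg (by omega)]
      rw [this]
      have hB : warS n naomi ken (i + 1) (j' + 1) = if i + 1 < n then n - (i + 1) else 0 := by
        by_cases hh : i + 1 < n
        · rw [warS, dif_pos hh, dif_neg (by omega), if_pos hh]
        · rw [warS_nonpos _ _ _ _ _ (by omega), if_neg hh]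
      rw [hB]
      by_cases hh : i + 1 < n
      · rw [if_pos hh]; ring
      · rw [if_neg hh]; omega
    · rw [if_neg (by omega), ih (i + 1) (by omega)]
      have : warS n naomi ken i j = warS n naomi ken (i + 1) (j' + 1) := by
        rw [← h1, warS, dif_pos hi, dif_pos h2.1, if_neg h2.2]
      rw [this]

-- B's loop over ken from index j, with naomi pointer i ≤ n, ends at n - warS i j
lemma portB_loop (n : Int) (naomi ken : List Int) (j : Int) :
    ∀ i, 0 ≤ i → i ≤ n →
    ((PySem.List.pyRange j n 1).foldl
      (fun i j =>
        if i < n ∧ (PySem.List.pyGet? naomi i).getD 0 ≤ (PySem.List.pyGet? ken j).getD 0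
        then i + 1 else i)
      i) = n - warS n naomi ken i j := by
  generalize hm : (n - j).toNat = m
  induction m generalizing j with
  | zero =>
    intro i h0 hn
    rw [PySem.List.pyRange_one_eq_nil (by omega), List.foldl_nil]
    by_cases hi : i < n
    · rw [warS, dif_pos hi, dif_neg (by omega)]; ring
    · rw [warS_nonpos _ _ _ _ _ (by omega)]; omega
  | succ m ih =>
    intro i h0 hn
    have hj : j < n := by omega
    rw [PySem.List.pyRange_one_cons hj, List.foldl_cons]
    by_cases hc : i < n ∧ (PySem.List.pyGet? naomi i).getD 0 ≤ (PySem.List.pyGet? ken j).getD 0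
    · rw [if_pos hc, ih (j + 1) (by omega) (i + 1) (by omega) (by omega)]
      have : warS n naomi ken i j = warS n naomi ken (i + 1) (j + 1) := by
        rw [warS, dif_pos hc.1, dif_pos hj, if_neg (by omega)]
      rw [this]
    · rw [if_neg hc, ih (j + 1) (by omega) i h0 hn]
      by_cases hi : i < n
      · have : warS n naomi ken i j = warS n naomi ken i (j + 1) := by
          rw [warS, dif_pos hi, dif_pos hj, if_pos (by by_contra hh; exact hc ⟨hi, by omega⟩)]
        rw [this]
      · rw [warS_nonpos _ _ _ _ _ (by omega), warS_nonpos _ _ _ _ _ (by omega)]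

-- ===== VERDICT (by name: the statement is the Claim_ definition above) =====
theorem doFairWar_spec : Claim_equal_doFairWar := by
  intro n naomi ken _ hpre
  show doFairWar n naomi ken = doFairWar_alt n naomi ken
  unfold doFairWar doFairWar_alt
  rw [portA_loop n naomi ken 0 0 0, portB_loop n naomi ken 0 0 le_rfl hpre.1]
  ring
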